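-- pv_equiv track=rewrite | github.com/godotengine/godot | thirdparty/mesa/src/util/format/u_format_pack.py | intermediate_native_type
-- ===== SOURCE A (Python) =====
-- def intermediate_native_type(bits, sign):
--     '''Find a native type adequate to hold intermediate results of the request bit size.'''
--
--     bytes = 4 # don't use anything smaller than 32bits
--     while bytes * 8 < bits:
--         bytes *= 2
--     bits = bytes*8
--
--     if sign:
--         return 'int%u_t' % bits
--     else:
--         return 'uint%u_t' % bits
-- ===== SOURCE B (Python) =====
-- def intermediate_native_type(bits, sign):
--     '''Find a native type adequate to hold intermediate results of the request bit size.'''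
--     # closed form: smallest power of two >= 32 and >= bits
--     bits = max(32, 1 << max(bits - 1, 0).bit_length())
--     return ('int%u_t' if sign else 'uint%u_t') % bits
-- ===== Notes on version B (the rewrite author's own statement) =====
-- stated objective: idiomatic
-- what changed: The doubling while-loop is replaced by a closed-form bit-length/shift computation of the smallest power-of-two width that is at least 32 and at least the requested bit count.
import Mathlib
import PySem

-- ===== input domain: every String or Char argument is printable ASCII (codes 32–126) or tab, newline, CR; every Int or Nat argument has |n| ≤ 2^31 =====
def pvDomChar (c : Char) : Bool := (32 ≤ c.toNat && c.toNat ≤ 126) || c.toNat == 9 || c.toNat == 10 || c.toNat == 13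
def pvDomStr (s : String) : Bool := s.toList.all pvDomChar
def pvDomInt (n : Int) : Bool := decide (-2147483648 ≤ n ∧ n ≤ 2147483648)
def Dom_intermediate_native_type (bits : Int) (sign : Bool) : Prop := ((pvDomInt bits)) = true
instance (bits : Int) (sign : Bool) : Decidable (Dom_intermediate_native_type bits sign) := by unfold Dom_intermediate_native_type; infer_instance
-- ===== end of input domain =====

-- B replaces A's doubling loop with a closed-form bit-length computation (idiomatic; same result).

-- ===== PORT A =====
-- the 'while bytes * 8 < bits: bytes *= 2' loop; h keeps bytes positive so the loop terminates
def pvGrow (bits bytes : Int) (h : 0 < bytes) : Int :=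
  if bytes * 8 < bits then pvGrow bits (bytes * 2) (by omega) else bytes
termination_by (bits - bytes * 8).toNat
decreasing_by omega

def intermediate_native_type (bits : Int) (sign : Bool) : String :=
  let bits2 : Int := pvGrow bits 4 (by norm_num) * 8
  if sign then "int" ++ PySem.Int.toStr bits2 ++ "_t"
  else "uint" ++ PySem.Int.toStr bits2 ++ "_t"

-- ===== PORT B =====
def intermediate_native_type_alt (bits : Int) (sign : Bool) : String :=
  -- bits = max(32, 1 << max(bits - 1, 0).bit_length());  1 << k = 2 ^ k
  let b : Int := max 32 (2 ^ PySem.Int.bitLength (max (bits - 1) 0))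
  (if sign then "int" else "uint") ++ PySem.Int.toStr b ++ "_t"

-- ===== PRECONDITION & SPEC =====
def Spec_intermediate_native_type (bits : Int) (sign : Bool) (out : String) : Prop := out = intermediate_native_type_alt bits sign
instance (bits : Int) (sign : Bool) (out : String) : Decidable (Spec_intermediate_native_type bits sign out) := by unfold Spec_intermediate_native_type; infer_instance

-- ===== CLAIM (what is proved, stated in full; the proofs are below) =====
def Claim_equal_intermediate_native_type : Prop := ∀ (bits : Int) (sign : Bool), Dom_intermediate_native_type bits sign → Spec_intermediate_native_type bits sign (intermediate_native_type bits sign)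

-- ===== LEMMAS AND PROOFS =====

-- ===== VERDICT (by name: the statement is the Claim_ definition above) =====
-- if bits fits in 2^j*8 bits, the requested bit_length is at most j+3
theorem bl_le_of_le (j : Nat) (bits : Int) (h : bits ≤ 2 ^ j * 8) :
    PySem.Int.bitLength (max (bits - 1) 0) ≤ j + 3 := by
  have hpow : (2:Int) ^ j * 8 = 2 ^ (j + 3) := by rw [pow_add]; ring
  by_cases h0 : bits - 1 ≤ 0
  · rw [max_eq_right h0, show PySem.Int.bitLength 0 = 0 from by decide]; omega
  · rw [max_eq_left (by omega)]
    have h0' : 0 < bits - 1 := by omega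
    set m : Int := bits - 1 with hm
    have h1 : 2 ^ (PySem.Int.bitLength m - 1) ≤ m.natAbs :=
      PySem.Int.two_pow_bitLength_le m (by omega)
    have hc : ((2 ^ (j + 3) : Nat) : Int) = (2:Int) ^ (j + 3) := by push_cast; ring
    have h3 : m.natAbs < 2 ^ (j + 3) := by omega
    have h4 : 2 ^ (PySem.Int.bitLength m - 1) < 2 ^ (j + 3) := lt_of_le_of_lt h1 h3
    have h5 : PySem.Int.bitLength m - 1 < j + 3 :=
      (Nat.pow_lt_pow_iff_right (by norm_num)).1 h4
    omega

-- if bits does not fit in 2^j*8 bits, the requested bit_length is at least j+4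
theorem bl_ge_of_lt (j : Nat) (bits : Int) (h : 2 ^ j * 8 < bits) :
    j + 4 ≤ PySem.Int.bitLength (max (bits - 1) 0) := by
  have hpow : (2:Int) ^ j * 8 = 2 ^ (j + 3) := by rw [pow_add]; ring
  have hppos : (0:Int) < 2 ^ (j + 3) := by positivity
  rw [max_eq_left (by omega)]
  set m : Int := bits - 1 with hm
  have h1 : m.natAbs < 2 ^ PySem.Int.bitLength m := PySem.Int.lt_two_pow_bitLength m
  have hc : ((2 ^ (j + 3) : Nat) : Int) = (2:Int) ^ (j + 3) := by push_cast; ring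
  have h3 : 2 ^ (j + 3) ≤ m.natAbs := by omega
  have h4 : (2:Nat) ^ (j + 3) < 2 ^ PySem.Int.bitLength m := lt_of_le_of_lt h3 h1
  have h5 : j + 3 < PySem.Int.bitLength m := (Nat.pow_lt_pow_iff_right (by norm_num)).1 h4
  omega

-- pvGrow only depends on the value of bytes, not on the positivity proof
theorem pvGrow_congr (bits b1 b2 : Int) (h1 : 0 < b1) (h2 : 0 < b2) (e : b1 = b2) :
    pvGrow bits b1 h1 = pvGrow bits b2 h2 := by subst e; rfl

-- loop characterisation: starting from bytes = 2^j (j ≥ 2), the loop result times 8 is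
-- the max of 2^(j+3) and 2^bit_length(max (bits-1) 0)
theorem pvGrow_eq : ∀ (n j : Nat) (bits : Int) (h : (0:Int) < 2 ^ j), 2 ≤ j →
    (bits - 2 ^ j * 8).toNat ≤ n →
    pvGrow bits (2 ^ j) h * 8 = max ((2:Int) ^ (j + 3)) (2 ^ PySem.Int.bitLength (max (bits - 1) 0)) := by
  intro n
  induction n with
  | zero =>
    intro j bits h hj hn
    have hle : bits ≤ 2 ^ j * 8 := by omega
    rw [pvGrow]
    simp only [if_neg (by omega : ¬ 2 ^ j * 8 < bits)]
    have hk : PySem.Int.bitLength (max (bits - 1) 0) ≤ j + 3 := bl_le_of_le j bits hle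
    have : (2:Int) ^ PySem.Int.bitLength (max (bits - 1) 0) ≤ 2 ^ (j + 3) :=
      pow_le_pow_right₀ (by norm_num) hk
    rw [max_eq_left this]
    rw [pow_add]; ring
  | succ n ih =>
    intro j bits h hj hn
    rw [pvGrow]
    by_cases hcond : 2 ^ j * 8 < bits
    · simp only [if_pos hcond]
      have hpos : (0:Int) < 2 ^ (j + 1) := by positivity
      rw [pvGrow_congr bits (2 ^ j * 2) (2 ^ (j + 1)) _ hpos (by ring)]
      have h4 : (4:Int) ≤ 2 ^ j := by
        calc (4:Int) = 2 ^ 2 := by norm_num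
        _ ≤ 2 ^ j := pow_le_pow_right₀ (by norm_num) hj
      have hstep : ((2:Int) ^ (j + 1)) = 2 ^ j * 2 := by ring
      have ih' := ih (j + 1) bits hpos (by omega) (by
        rw [hstep]; omega)
      rw [ih']
      have hk : j + 4 ≤ PySem.Int.bitLength (max (bits - 1) 0) := bl_ge_of_lt j bits hcond
      have e1 : ((2:Int) ^ (j + 1 + 3)) ≤ 2 ^ PySem.Int.bitLength (max (bits - 1) 0) :=
        pow_le_pow_right₀ (by norm_num) (by omega)
      have e2 : ((2:Int) ^ (j + 3)) ≤ 2 ^ PySem.Int.bitLength (max (bits - 1) 0) :=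
        pow_le_pow_right₀ (by norm_num) (by omega)
      rw [max_eq_right e1, max_eq_right e2]
    · simp only [if_neg hcond]
      have hk : PySem.Int.bitLength (max (bits - 1) 0) ≤ j + 3 := bl_le_of_le j bits (by omega)
      have : (2:Int) ^ PySem.Int.bitLength (max (bits - 1) 0) ≤ 2 ^ (j + 3) :=
        pow_le_pow_right₀ (by norm_num) hk
      rw [max_eq_left this]
      rw [pow_add]; ring

theorem intermediate_native_type_spec : Claim_equal_intermediate_native_type := by
  intro bits sign _
  unfold Spec_intermediate_native_type intermediate_native_type intermediate_native_type_alt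
  have e : pvGrow bits 4 (by norm_num) * 8
      = max ((2:Int) ^ (2 + 3)) (2 ^ PySem.Int.bitLength (max (bits - 1) 0)) := by
    have := pvGrow_eq (bits - 32).toNat 2 bits (by norm_num) (le_refl 2)
    rw [pvGrow_congr bits 4 (2 ^ 2) (by norm_num) (by norm_num) (by norm_num)]
    exact this (by norm_num)
  simp only [e]
  norm_num
  cases sign <;> simp
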